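-- pv_equiv track=rewrite | github.com/ShotaMiwa/year1-research | src/evaluation/detector.py | boundaries_to_labels
-- ===== SOURCE A (Python) =====
-- from typing import List, Tuple, Dict
--
-- def boundaries_to_labels(
--     boundaries: List[int],
--     total_length: int
-- ) -> List[int]:
--     """
--     境界インデックスを0/1ラベルに変換
--
--     Args:
--         boundaries: 境界インデックスのリスト
--         total_length: 総長さ
--
--     Returns:
--         0/1ラベルのリスト
--     """
--     labels = [0] * total_length
--     for b in boundaries:
--         if 0 <= b < total_length:
--             labels[b] = 1
--     return labels
-- ===== SOURCE B (Python) =====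
-- def boundaries_to_labels(boundaries, total_length):
--     valid = set(boundaries)
--     return [1 if i in valid else 0 for i in range(total_length)]
-- ===== Notes on version B (the rewrite author's own statement) =====
-- stated objective: idiomatic
-- what changed: B iterates over positions 0..total_length-1 with a comprehension testing membership in a set of the boundaries, instead of A's preallocated zero array written into by a loop over the boundaries; range checks disappear because only in-range positions are generated.
import Mathlib
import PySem

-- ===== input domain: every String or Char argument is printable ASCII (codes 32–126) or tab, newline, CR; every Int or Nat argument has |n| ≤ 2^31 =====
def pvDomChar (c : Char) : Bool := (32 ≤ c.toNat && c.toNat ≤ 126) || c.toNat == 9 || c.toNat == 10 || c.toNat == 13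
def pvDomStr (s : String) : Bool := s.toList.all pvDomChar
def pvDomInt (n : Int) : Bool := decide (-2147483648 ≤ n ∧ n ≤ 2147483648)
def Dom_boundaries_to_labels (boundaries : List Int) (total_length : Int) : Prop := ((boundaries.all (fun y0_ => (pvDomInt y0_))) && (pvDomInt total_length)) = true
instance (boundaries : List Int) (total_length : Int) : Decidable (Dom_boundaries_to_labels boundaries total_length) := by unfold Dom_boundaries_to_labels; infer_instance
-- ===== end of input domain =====

-- B replaces A's loop over boundaries writing 1s into a preallocated zero array by a
-- single comprehension over all positions testing membership in a set of the boundaries (idiomatic).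

-- ===== PORT A =====
def boundaries_to_labels (boundaries : List Int) (total_length : Int) : List Int :=
  let labels := List.replicate total_length.toNat 0
  boundaries.foldl
    (fun labels b => if 0 ≤ b ∧ b < total_length then labels.set b.toNat 1 else labels)
    labels

-- ===== PORT B =====
def boundaries_to_labels_alt (boundaries : List Int) (total_length : Int) : List Int :=
  let valid : PySem.Set Int := PySem.Set.ofList boundaries
  (PySem.List.pyRange 0 total_length 1).map (fun i => if PySem.Set.contains valid i then 1 else 0)

-- ===== PRECONDITION & SPEC =====
def Spec_boundaries_to_labels (boundaries : List Int) (total_length : Int) (out : List Int) : Prop := out = boundaries_to_labels_alt boundaries total_length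
instance (boundaries : List Int) (total_length : Int) (out : List Int) : Decidable (Spec_boundaries_to_labels boundaries total_length out) := by unfold Spec_boundaries_to_labels; infer_instance

-- ===== CLAIM (what is proved, stated in full; the proofs are below) =====
def Claim_equal_boundaries_to_labels : Prop := ∀ (boundaries : List Int) (total_length : Int), Dom_boundaries_to_labels boundaries total_length → Spec_boundaries_to_labels boundaries total_length (boundaries_to_labels boundaries total_length)

-- ===== LEMMAS AND PROOFS =====

theorem foldA_length (tl : Int) (bs : List Int) (L : List Int) :
    (bs.foldl (fun labels b => if 0 ≤ b ∧ b < tl then labels.set b.toNat 1 else labels) L).length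
      = L.length := by
  induction bs generalizing L with
  | nil => rfl
  | cons b bs ih =>
      simp only [List.foldl_cons]
      rw [ih]
      split <;> simp

theorem foldA_get (tl : Int) (bs : List Int) (L : List Int) (i : Nat)
    (hL : L.length = tl.toNat) (hi : i < L.length) :
    (bs.foldl (fun labels b => if 0 ≤ b ∧ b < tl then labels.set b.toNat 1 else labels) L)[i]'
        (by rw [foldA_length]; exact hi)
      = if (i : Int) ∈ bs then 1 else L[i] := by
  induction bs generalizing L with
  | nil => simp
  | cons b bs ih =>
      have hlen : (if 0 ≤ b ∧ b < tl then L.set b.toNat 1 else L).length = L.length := by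
        split <;> simp
      simp only [List.foldl_cons]
      rw [ih _ (by rw [hlen]; exact hL) (by rw [hlen]; exact hi)]
      by_cases hmem : (i : Int) ∈ bs
      · simp [hmem]
      · simp only [List.mem_cons, hmem, or_false]
        have hI : i < tl.toNat := hL ▸ hi
        by_cases hb : 0 ≤ b ∧ b < tl
        · by_cases hbi : (i : Int) = b
          · have hbt : b.toNat = i := by omega
            simp [hb, hbt, hbi]
          · have hne : ¬ b.toNat = i := by omega
            simp [hb, hne, hbi]
        · have hbi : ¬ (i : Int) = b := by omega
          simp [hb, hbi]

-- ===== VERDICT (by name: the statement is the Claim_ definition above) =====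
theorem boundaries_to_labels_spec : Claim_equal_boundaries_to_labels := by
  intro bs tl _
  unfold Spec_boundaries_to_labels boundaries_to_labels boundaries_to_labels_alt
  apply List.ext_getElem
  · rw [foldA_length]
    simp [PySem.List.length_pyRange_one]
  · intro i h1 h2
    have hi : i < (tl - 0).toNat := by
      simpa [PySem.List.length_pyRange_one] using h2
    rw [foldA_get tl bs _ i (by simp) (by simp; omega)]
    rw [List.getElem_map, PySem.List.getElem_pyRange_one]
    have : PySem.Set.contains (PySem.Set.ofList bs) (0 + (i : Int)) = ((i : Int) ∈ bs) := by
      simp [PySem.Set.mem_ofList]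
    simp only [this]
    split <;> simp [List.getElem_replicate]
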